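-- pv_equiv track=rewrite | github.com/felixwl/lsdm-project | analyses/6-class_evicted.py | is_evicted
-- ===== SOURCE A (Python) =====
-- def is_evicted(events):
--     evicted = 0
--     scheduling_class = ""
--     for event in events:
--         scheduling_class = event[1]
--         if event[0] == "2":
--             evicted = 1
--     return (scheduling_class, evicted)
-- ===== SOURCE B (Python) =====
-- def is_evicted(events):
--     if not events:
--         return ("", 0)
--     scheduling_class = events[-1][1]
--     for event in reversed(events):
--         if event[0] == "2":
--             return (scheduling_class, 1)
--     return (scheduling_class, 0)
-- ===== Notes on version B (the rewrite author's own statement) =====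
-- stated objective: alternative
-- what changed: Replaces A's fused forward accumulator loop with a backward traversal: take the scheduling class directly from the last element, then scan the list in reverse and return early at the first '2' event.
import Mathlib
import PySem

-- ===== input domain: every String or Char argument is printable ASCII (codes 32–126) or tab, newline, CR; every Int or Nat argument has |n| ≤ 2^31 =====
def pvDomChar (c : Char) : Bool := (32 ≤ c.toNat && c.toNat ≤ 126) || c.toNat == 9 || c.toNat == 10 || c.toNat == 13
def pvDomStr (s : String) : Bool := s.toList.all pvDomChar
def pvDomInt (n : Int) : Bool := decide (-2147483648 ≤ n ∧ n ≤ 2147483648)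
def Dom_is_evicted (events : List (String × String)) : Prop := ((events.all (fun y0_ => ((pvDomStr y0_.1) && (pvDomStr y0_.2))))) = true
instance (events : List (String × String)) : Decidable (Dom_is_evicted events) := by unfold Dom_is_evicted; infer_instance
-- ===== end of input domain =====

-- B traverses the list backwards with an early return at the first "2" event, instead of A's fused forward accumulator loop.

-- ===== PORT A =====
def is_evicted (events : List (String × String)) : String × Int :=
  events.foldl (fun s event => (event.2, if event.1 == "2" then 1 else s.2)) ("", 0)

-- ===== PORT B =====
-- the reverse scan with early return: first event (of the reversed list) whose first field is "2" yields 1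
def is_evicted_altScan (sc : String) : List (String × String) → String × Int
  | [] => (sc, 0)
  | event :: rest => if event.1 == "2" then (sc, 1) else is_evicted_altScan sc rest

def is_evicted_alt (events : List (String × String)) : String × Int :=
  match events.getLast? with
  | none => ("", 0)
  | some last => is_evicted_altScan last.2 events.reverse

-- ===== PRECONDITION & SPEC =====
def Spec_is_evicted (events : List (String × String)) (out : String × Int) : Prop := out = is_evicted_alt events
instance (events : List (String × String)) (out : String × Int) : Decidable (Spec_is_evicted events out) := by unfold Spec_is_evicted; infer_instance

-- ===== CLAIM (what is proved, stated in full; the proofs are below) =====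
def Claim_equal_is_evicted : Prop := ∀ (events : List (String × String)), Dom_is_evicted events → Spec_is_evicted events (is_evicted events)

-- ===== LEMMAS AND PROOFS =====
theorem altScan_eq_any (sc : String) (xs : List (String × String)) :
    is_evicted_altScan sc xs = (sc, if xs.any (fun e => e.1 == "2") then 1 else 0) := by
  induction xs with
  | nil => simp [is_evicted_altScan]
  | cons h t ih => simp only [is_evicted_altScan, List.any_cons, ih]; split_ifs <;> simp_all

theorem is_evicted_foldl (events : List (String × String)) (sc : String) (ev : Int) :
    events.foldl (fun s event => (event.2, if event.1 == "2" then 1 else s.2)) (sc, ev)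
      = (match events.getLast? with | some e => e.2 | none => sc,
         if events.any (fun e => e.1 == "2") then 1 else ev) := by
  induction events generalizing sc ev with
  | nil => simp
  | cons h t ih =>
    simp only [List.foldl_cons, List.any_cons, ih]
    cases t with
    | nil => simp
    | cons h' t' =>
      rcases hl : (h' :: t').getLast? with _ | l
      · simp at hl
      · simp only [ih, hl, List.getLast?_cons_cons] at *
        split_ifs <;> simp_all

-- ===== VERDICT (by name: the statement is the Claim_ definition above) =====
theorem is_evicted_spec : Claim_equal_is_evicted := by
  intro events _
  show _ = _
  rw [is_evicted, is_evicted_alt, is_evicted_foldl]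
  cases hl : events.getLast? with
  | none => simp_all
  | some l =>
    simp only [altScan_eq_any]
    rw [List.any_reverse]
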